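-- pv_equiv track=rewrite | github.com/ziliihe/pythonchallenge | foobarwithgoogle.py | solution03
-- ===== SOURCE A (Python) =====
-- def solution03(x):
--     sumOfX = sum(x)
--     remain = sumOfX % 3
--     if not remain:
--         return x
--
--     if remain == 1:
--         if 1 in x:
--             x.remove(1)
--             return x
--         if 4 in x:
--             x.remove(4)
--             return x
--         if 7 in x:
--             x.remove(7)
--             return x
--         if 2 in x:
--             x.remove(2)
--             return solution03(x)
--         if 5 in x:
--             x.remove(5)
--             return solution03(x)
--         if 8 in x:
--             x.remove(8)
--             return solution03(x)
--     if remain == 2: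
--         if 2 in x:
--             x.remove(2)
--             return x
--         if 5 in x:
--             x.remove(5)
--             return x
--         if 8 in x:
--             x.remove(8)
--             return x
--         if 1 in x:
--             x.remove(1)
--             return solution03(x)
--         if 4 in x:
--             x.remove(4)
--             return solution03(x)
--         if 7 in x:
--             x.remove(7)
--             return solution03(x)
-- ===== SOURCE B (Python) =====
-- def solution03(x):
--     while True:
--         remain = sum(x) % 3
--         if remain == 0:
--             return x
--         order = [1, 4, 7, 2, 5, 8] if remain == 1 else [2, 5, 8, 1, 4, 7]
--         v = next((v for v in order if v in x), None)
--         if v is None: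
--             return None
--         x.remove(v)
-- ===== Notes on version B (the rewrite author's own statement) =====
-- stated objective: simpler
-- what changed: Replaced the twelve-branch if-cascade with self-recursion by a single while-loop driven by a remainder-indexed priority table and a first-match scan.
-- outside the precondition, e.g. on solution03([10]): A returns None, B returns None
import Mathlib
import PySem

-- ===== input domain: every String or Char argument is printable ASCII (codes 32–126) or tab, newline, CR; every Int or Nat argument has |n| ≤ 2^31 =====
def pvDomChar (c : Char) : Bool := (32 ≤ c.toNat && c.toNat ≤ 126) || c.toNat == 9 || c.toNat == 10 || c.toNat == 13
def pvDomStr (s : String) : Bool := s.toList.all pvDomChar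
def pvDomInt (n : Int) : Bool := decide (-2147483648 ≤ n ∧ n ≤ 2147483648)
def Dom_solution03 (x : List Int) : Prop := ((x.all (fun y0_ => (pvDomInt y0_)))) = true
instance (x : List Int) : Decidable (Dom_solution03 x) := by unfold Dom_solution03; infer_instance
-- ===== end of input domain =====

-- B replaces A's twelve-branch if-cascade + self-recursion by one while-loop driven by a
-- remainder-indexed priority table and a first-match scan (objective: simpler).
-- Both A and B mutate the caller's list in Python; the equivalence proved here is about the
-- RETURN value only (both perform the same removals in the same order).

-- x.remove(v): Python removes the first occurrence (guarded by 'v in x' in both programs)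
def pyRemove (x : List Int) (v : Int) : List Int := (PySem.List.remove? x v).getD x

theorem pyRemove_length_lt {x : List Int} {v : Int} (h : x.contains v = true) :
    (pyRemove x v).length < x.length := by
  have hv : v ∈ x := by simpa using h
  simp [pyRemove, PySem.List.remove?_eq_some_erase x v hv]
  have := List.length_erase_add_one hv
  omega

-- ===== PORT A =====
def solution03 (x : List Int) : List Int :=
  let sumOfX := x.sum
  let remain := PySem.Int.mod sumOfX 3
  if remain = 0 then x
  else if remain = 1 then
    if x.contains 1 then pyRemove x 1
    else if x.contains 4 then pyRemove x 4
    else if x.contains 7 then pyRemove x 7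
    else if x.contains 2 then solution03 (pyRemove x 2)
    else if x.contains 5 then solution03 (pyRemove x 5)
    else if x.contains 8 then solution03 (pyRemove x 8)
    else []  -- Python falls off the end and returns None here (excluded by Pre_)
  else -- remain = 2
    if x.contains 2 then pyRemove x 2
    else if x.contains 5 then pyRemove x 5
    else if x.contains 8 then pyRemove x 8
    else if x.contains 1 then solution03 (pyRemove x 1)
    else if x.contains 4 then solution03 (pyRemove x 4)
    else if x.contains 7 then solution03 (pyRemove x 7)
    else []  -- Python returns None here (excluded by Pre_)
termination_by x.length
decreasing_by all_goals exact pyRemove_length_lt (by assumption)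

-- ===== PORT B =====
def solution03_alt (x : List Int) : List Int :=
  let remain := PySem.Int.mod x.sum 3
  if remain = 0 then x
  else
    let order : List Int := if remain = 1 then [1, 4, 7, 2, 5, 8] else [2, 5, 8, 1, 4, 7]
    let v? := order.find? (fun v => x.contains v)
    if hsome : v?.isSome then solution03_alt (pyRemove x (v?.get hsome))
    else []  -- v is None: Python B returns None here (excluded by Pre_)
termination_by x.length
decreasing_by exact pyRemove_length_lt (List.find?_some (Option.some_get hsome).symm)

-- ===== PRECONDITION & SPEC =====
-- Pre_ excludes exactly the inputs on which Python A falls through all branches and returns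
-- None (no value of the declared list type); B returns None there too.
def Pre_solution03 (x : List Int) : Prop :=
  PySem.Int.mod x.sum 3 = 0 ∨
  (PySem.Int.mod x.sum 3 = 1 ∧
    (1 ∈ x ∨ 4 ∈ x ∨ 7 ∈ x ∨ 2 ≤ x.count 2 + x.count 5 + x.count 8)) ∨
  (PySem.Int.mod x.sum 3 = 2 ∧
    (2 ∈ x ∨ 5 ∈ x ∨ 8 ∈ x ∨ 2 ≤ x.count 1 + x.count 4 + x.count 7))
instance (x : List Int) : Decidable (Pre_solution03 x) := by unfold Pre_solution03; infer_instance

def pvWitness_solution03 : List Int := [1, 3, 6]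

def Spec_solution03 (x : List Int) (out : List Int) : Prop := out = solution03_alt x
instance (x : List Int) (out : List Int) : Decidable (Spec_solution03 x out) := by unfold Spec_solution03; infer_instance

-- ===== CLAIM (what is proved, stated in full; the proofs are below) =====
def Claim_equal_solution03 : Prop := ∀ (x : List Int), Dom_solution03 x → Pre_solution03 x → Spec_solution03 x (solution03 x)

-- ===== LEMMAS AND PROOFS =====

theorem mod3_pysem (s : Int) : PySem.Int.mod s 3 = s % 3 :=
  PySem.Int.mod_eq_emod_of_pos (by norm_num)

theorem alt_done {x : List Int} (h : x.sum % 3 = 0) : solution03_alt x = x := by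
  rw [solution03_alt]; simp [mod3_pysem, h]

theorem pyRemove_of_mem {x : List Int} {v : Int} (h : v ∈ x) : pyRemove x v = x.erase v := by
  simp [pyRemove, PySem.List.remove?_eq_some_erase x v h]

theorem sum_erase_int {x : List Int} {v : Int} (h : v ∈ x) : (x.erase v).sum = x.sum - v := by
  have := (List.perm_cons_erase h).sum_eq
  simp at this; omega

theorem mem_erase_of_ne' {x : List Int} {v w : Int} (hne : w ≠ v) :
    w ∈ x.erase v ↔ w ∈ x := List.mem_erase_of_ne hne

theorem count_le_one_of_not_mem_erase {x : List Int} {v : Int} (h : v ∉ x.erase v) :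
    x.count v ≤ 1 := by
  have h1 := List.count_erase_self (a := v) (l := x)
  have h2 : (x.erase v).count v = 0 := List.count_eq_zero.mpr h
  omega

theorem count_zero_of_not_mem {x : List Int} {v : Int} (h : v ∉ x) : x.count v = 0 :=
  List.count_eq_zero.mpr h

theorem main_equiv (x : List Int) (hP : Pre_solution03 x) : solution03 x = solution03_alt x := by
  have h3 : x.sum % 3 = 0 ∨ x.sum % 3 = 1 ∨ x.sum % 3 = 2 := by omega
  rcases h3 with hr | hr | hr
  · rw [solution03, solution03_alt]; simp [mod3_pysem, hr]
  · -- remainder 1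
    by_cases hm1 : (1 : Int) ∈ x
    · rw [solution03, solution03_alt]
      simp [mod3_pysem, hr, List.find?, hm1, pyRemove_of_mem hm1]
      rw [alt_done (by have h9 := sum_erase_int hm1; omega)]
    · have hn1 : (1 : Int) ∉ x := hm1
      by_cases hm4 : (4 : Int) ∈ x
      · rw [solution03, solution03_alt]
        simp [mod3_pysem, hr, List.find?, hn1, hm4, pyRemove_of_mem hm4]
        rw [alt_done (by have h9 := sum_erase_int hm4; omega)]
      · have hn4 : (4 : Int) ∉ x := hm4
        by_cases hm7 : (7 : Int) ∈ x
        · rw [solution03, solution03_alt]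
          simp [mod3_pysem, hr, List.find?, hn1, hn4, hm7, pyRemove_of_mem hm7]
          rw [alt_done (by have h9 := sum_erase_int hm7; omega)]
        · have hn7 : (7 : Int) ∉ x := hm7
          by_cases hm2 : (2 : Int) ∈ x
          · have hsum : (x.erase 2).sum = x.sum - 2 := sum_erase_int hm2
            have hr' : (x.erase 2).sum % 3 = 2 := by rw [hsum]; omega
            rw [solution03, solution03_alt]
            simp [mod3_pysem, hr, List.find?, hn1, hn4, hn7, hm2, pyRemove_of_mem hm2]
            have hn1' : (1 : Int) ∉ x.erase 2 := fun h => hn1 ((mem_erase_of_ne' (by norm_num)).mp h)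
            have hn4' : (4 : Int) ∉ x.erase 2 := fun h => hn4 ((mem_erase_of_ne' (by norm_num)).mp h)
            have hn7' : (7 : Int) ∉ x.erase 2 := fun h => hn7 ((mem_erase_of_ne' (by norm_num)).mp h)
            by_cases hm22 : (2 : Int) ∈ x.erase 2
            · rw [solution03, solution03_alt]
              simp [mod3_pysem, hr', List.find?, hn1', hn4', hn7', hm22, pyRemove_of_mem hm22]
              rw [alt_done (by have h9 := sum_erase_int hm22; rw [h9, hsum]; omega)]
            · have hn22 : (2 : Int) ∉ x.erase 2 := hm22
              by_cases hm5 : (5 : Int) ∈ x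
              · have hm52 : (5 : Int) ∈ x.erase 2 := (mem_erase_of_ne' (by norm_num)).mpr hm5
                rw [solution03, solution03_alt]
                simp [mod3_pysem, hr', List.find?, hn1', hn4', hn7', hn22, hm52, pyRemove_of_mem hm52]
                rw [alt_done (by have h9 := sum_erase_int hm52; rw [h9, hsum]; omega)]
              · have hn5 : (5 : Int) ∉ x := hm5
                have hn52 : (5 : Int) ∉ x.erase 2 := fun h => hn5 ((mem_erase_of_ne' (by norm_num)).mp h)
                by_cases hm8 : (8 : Int) ∈ x
                · have hm82 : (8 : Int) ∈ x.erase 2 := (mem_erase_of_ne' (by norm_num)).mpr hm8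
                  rw [solution03, solution03_alt]
                  simp [mod3_pysem, hr', List.find?, hn1', hn4', hn7', hn22, hn52, hm82, pyRemove_of_mem hm82]
                  rw [alt_done (by have h9 := sum_erase_int hm82; rw [h9, hsum]; omega)]
                · have hn8 : (8 : Int) ∉ x := hm8
                  have hn82 : (8 : Int) ∉ x.erase 2 := fun h => hn8 ((mem_erase_of_ne' (by norm_num)).mp h)
                  exfalso
                  have k2 := count_le_one_of_not_mem_erase hn22
                  have k5 := count_zero_of_not_mem hn5
                  have k8 := count_zero_of_not_mem hn8
                  rcases hP with hp0 | ⟨hp1, hd1⟩ | ⟨hp2, hd2⟩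
                  · rw [mod3_pysem] at hp0; omega
                  · rcases hd1 with m | m | m | m
                    · exact hn1 m
                    · exact hn4 m
                    · exact hn7 m
                    · omega
                  · rw [mod3_pysem] at hp2; omega
          · have hn2 : (2 : Int) ∉ x := hm2
            by_cases hm5 : (5 : Int) ∈ x
            · have hsum : (x.erase 5).sum = x.sum - 5 := sum_erase_int hm5
              have hr' : (x.erase 5).sum % 3 = 2 := by rw [hsum]; omega
              rw [solution03, solution03_alt]
              simp [mod3_pysem, hr, List.find?, hn1, hn4, hn7, hn2, hm5, pyRemove_of_mem hm5]
              have hn1' : (1 : Int) ∉ x.erase 5 := fun h => hn1 ((mem_erase_of_ne' (by norm_num)).mp h)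
              have hn4' : (4 : Int) ∉ x.erase 5 := fun h => hn4 ((mem_erase_of_ne' (by norm_num)).mp h)
              have hn7' : (7 : Int) ∉ x.erase 5 := fun h => hn7 ((mem_erase_of_ne' (by norm_num)).mp h)
              have hn22 : (2 : Int) ∉ x.erase 5 := fun h => hn2 ((mem_erase_of_ne' (by norm_num)).mp h)
              by_cases hm52 : (5 : Int) ∈ x.erase 5
              · rw [solution03, solution03_alt]
                simp [mod3_pysem, hr', List.find?, hn1', hn4', hn7', hn22, hm52, pyRemove_of_mem hm52]
                rw [alt_done (by have h9 := sum_erase_int hm52; rw [h9, hsum]; omega)]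
              · have hn52 : (5 : Int) ∉ x.erase 5 := hm52
                by_cases hm8 : (8 : Int) ∈ x
                · have hm82 : (8 : Int) ∈ x.erase 5 := (mem_erase_of_ne' (by norm_num)).mpr hm8
                  rw [solution03, solution03_alt]
                  simp [mod3_pysem, hr', List.find?, hn1', hn4', hn7', hn22, hn52, hm82, pyRemove_of_mem hm82]
                  rw [alt_done (by have h9 := sum_erase_int hm82; rw [h9, hsum]; omega)]
                · have hn8 : (8 : Int) ∉ x := hm8
                  have hn82 : (8 : Int) ∉ x.erase 5 := fun h => hn8 ((mem_erase_of_ne' (by norm_num)).mp h)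
                  exfalso
                  have k2 := count_zero_of_not_mem hn2
                  have k5 := count_le_one_of_not_mem_erase hn52
                  have k8 := count_zero_of_not_mem hn8
                  rcases hP with hp0 | ⟨hp1, hd1⟩ | ⟨hp2, hd2⟩
                  · rw [mod3_pysem] at hp0; omega
                  · rcases hd1 with m | m | m | m
                    · exact hn1 m
                    · exact hn4 m
                    · exact hn7 m
                    · omega
                  · rw [mod3_pysem] at hp2; omega
            · have hn5 : (5 : Int) ∉ x := hm5
              by_cases hm8 : (8 : Int) ∈ x
              · have hsum : (x.erase 8).sum = x.sum - 8 := sum_erase_int hm8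
                have hr' : (x.erase 8).sum % 3 = 2 := by rw [hsum]; omega
                rw [solution03, solution03_alt]
                simp [mod3_pysem, hr, List.find?, hn1, hn4, hn7, hn2, hn5, hm8, pyRemove_of_mem hm8]
                have hn1' : (1 : Int) ∉ x.erase 8 := fun h => hn1 ((mem_erase_of_ne' (by norm_num)).mp h)
                have hn4' : (4 : Int) ∉ x.erase 8 := fun h => hn4 ((mem_erase_of_ne' (by norm_num)).mp h)
                have hn7' : (7 : Int) ∉ x.erase 8 := fun h => hn7 ((mem_erase_of_ne' (by norm_num)).mp h)
                have hn22 : (2 : Int) ∉ x.erase 8 := fun h => hn2 ((mem_erase_of_ne' (by norm_num)).mp h)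
                have hn52 : (5 : Int) ∉ x.erase 8 := fun h => hn5 ((mem_erase_of_ne' (by norm_num)).mp h)
                by_cases hm82 : (8 : Int) ∈ x.erase 8
                · rw [solution03, solution03_alt]
                  simp [mod3_pysem, hr', List.find?, hn1', hn4', hn7', hn22, hn52, hm82, pyRemove_of_mem hm82]
                  rw [alt_done (by have h9 := sum_erase_int hm82; rw [h9, hsum]; omega)]
                · have hn82 : (8 : Int) ∉ x.erase 8 := hm82
                  exfalso
                  have k2 := count_zero_of_not_mem hn2
                  have k5 := count_zero_of_not_mem hn5
                  have k8 := count_le_one_of_not_mem_erase hn82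
                  rcases hP with hp0 | ⟨hp1, hd1⟩ | ⟨hp2, hd2⟩
                  · rw [mod3_pysem] at hp0; omega
                  · rcases hd1 with m | m | m | m
                    · exact hn1 m
                    · exact hn4 m
                    · exact hn7 m
                    · omega
                  · rw [mod3_pysem] at hp2; omega
              · have hn8 : (8 : Int) ∉ x := hm8
                exfalso
                have k2 := count_zero_of_not_mem hn2
                have k5 := count_zero_of_not_mem hn5
                have k8 := count_zero_of_not_mem hn8
                rcases hP with hp0 | ⟨hp1, hd1⟩ | ⟨hp2, hd2⟩
                · rw [mod3_pysem] at hp0; omega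
                · rcases hd1 with m | m | m | m
                  · exact hn1 m
                  · exact hn4 m
                  · exact hn7 m
                  · omega
                · rw [mod3_pysem] at hp2; omega
  · -- remainder 2
    by_cases hm2 : (2 : Int) ∈ x
    · rw [solution03, solution03_alt]
      simp [mod3_pysem, hr, List.find?, hm2, pyRemove_of_mem hm2]
      rw [alt_done (by have h9 := sum_erase_int hm2; omega)]
    · have hn2 : (2 : Int) ∉ x := hm2
      by_cases hm5 : (5 : Int) ∈ x
      · rw [solution03, solution03_alt]
        simp [mod3_pysem, hr, List.find?, hn2, hm5, pyRemove_of_mem hm5]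
        rw [alt_done (by have h9 := sum_erase_int hm5; omega)]
      · have hn5 : (5 : Int) ∉ x := hm5
        by_cases hm8 : (8 : Int) ∈ x
        · rw [solution03, solution03_alt]
          simp [mod3_pysem, hr, List.find?, hn2, hn5, hm8, pyRemove_of_mem hm8]
          rw [alt_done (by have h9 := sum_erase_int hm8; omega)]
        · have hn8 : (8 : Int) ∉ x := hm8
          by_cases hm1 : (1 : Int) ∈ x
          · have hsum : (x.erase 1).sum = x.sum - 1 := sum_erase_int hm1
            have hr' : (x.erase 1).sum % 3 = 1 := by rw [hsum]; omega
            rw [solution03, solution03_alt]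
            simp [mod3_pysem, hr, List.find?, hn2, hn5, hn8, hm1, pyRemove_of_mem hm1]
            have hn2' : (2 : Int) ∉ x.erase 1 := fun h => hn2 ((mem_erase_of_ne' (by norm_num)).mp h)
            have hn5' : (5 : Int) ∉ x.erase 1 := fun h => hn5 ((mem_erase_of_ne' (by norm_num)).mp h)
            have hn8' : (8 : Int) ∉ x.erase 1 := fun h => hn8 ((mem_erase_of_ne' (by norm_num)).mp h)
            by_cases hm12 : (1 : Int) ∈ x.erase 1
            · rw [solution03, solution03_alt]
              simp [mod3_pysem, hr', List.find?, hn2', hn5', hn8', hm12, pyRemove_of_mem hm12]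
              rw [alt_done (by have h9 := sum_erase_int hm12; rw [h9, hsum]; omega)]
            · have hn12 : (1 : Int) ∉ x.erase 1 := hm12
              by_cases hm4 : (4 : Int) ∈ x
              · have hm42 : (4 : Int) ∈ x.erase 1 := (mem_erase_of_ne' (by norm_num)).mpr hm4
                rw [solution03, solution03_alt]
                simp [mod3_pysem, hr', List.find?, hn2', hn5', hn8', hn12, hm42, pyRemove_of_mem hm42]
                rw [alt_done (by have h9 := sum_erase_int hm42; rw [h9, hsum]; omega)]
              · have hn4 : (4 : Int) ∉ x := hm4
                have hn42 : (4 : Int) ∉ x.erase 1 := fun h => hn4 ((mem_erase_of_ne' (by norm_num)).mp h)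
                by_cases hm7 : (7 : Int) ∈ x
                · have hm72 : (7 : Int) ∈ x.erase 1 := (mem_erase_of_ne' (by norm_num)).mpr hm7
                  rw [solution03, solution03_alt]
                  simp [mod3_pysem, hr', List.find?, hn2', hn5', hn8', hn12, hn42, hm72, pyRemove_of_mem hm72]
                  rw [alt_done (by have h9 := sum_erase_int hm72; rw [h9, hsum]; omega)]
                · have hn7 : (7 : Int) ∉ x := hm7
                  have hn72 : (7 : Int) ∉ x.erase 1 := fun h => hn7 ((mem_erase_of_ne' (by norm_num)).mp h)
                  exfalso
                  have k1 := count_le_one_of_not_mem_erase hn12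
                  have k4 := count_zero_of_not_mem hn4
                  have k7 := count_zero_of_not_mem hn7
                  rcases hP with hp0 | ⟨hp1, hd1⟩ | ⟨hp2, hd2⟩
                  · rw [mod3_pysem] at hp0; omega
                  · rw [mod3_pysem] at hp1; omega
                  · rcases hd2 with m | m | m | m
                    · exact hn2 m
                    · exact hn5 m
                    · exact hn8 m
                    · omega
          · have hn1 : (1 : Int) ∉ x := hm1
            by_cases hm4 : (4 : Int) ∈ x
            · have hsum : (x.erase 4).sum = x.sum - 4 := sum_erase_int hm4
              have hr' : (x.erase 4).sum % 3 = 1 := by rw [hsum]; omega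
              rw [solution03, solution03_alt]
              simp [mod3_pysem, hr, List.find?, hn2, hn5, hn8, hn1, hm4, pyRemove_of_mem hm4]
              have hn2' : (2 : Int) ∉ x.erase 4 := fun h => hn2 ((mem_erase_of_ne' (by norm_num)).mp h)
              have hn5' : (5 : Int) ∉ x.erase 4 := fun h => hn5 ((mem_erase_of_ne' (by norm_num)).mp h)
              have hn8' : (8 : Int) ∉ x.erase 4 := fun h => hn8 ((mem_erase_of_ne' (by norm_num)).mp h)
              have hn12 : (1 : Int) ∉ x.erase 4 := fun h => hn1 ((mem_erase_of_ne' (by norm_num)).mp h)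
              by_cases hm42 : (4 : Int) ∈ x.erase 4
              · rw [solution03, solution03_alt]
                simp [mod3_pysem, hr', List.find?, hn2', hn5', hn8', hn12, hm42, pyRemove_of_mem hm42]
                rw [alt_done (by have h9 := sum_erase_int hm42; rw [h9, hsum]; omega)]
              · have hn42 : (4 : Int) ∉ x.erase 4 := hm42
                by_cases hm7 : (7 : Int) ∈ x
                · have hm72 : (7 : Int) ∈ x.erase 4 := (mem_erase_of_ne' (by norm_num)).mpr hm7
                  rw [solution03, solution03_alt]
                  simp [mod3_pysem, hr', List.find?, hn2', hn5', hn8', hn12, hn42, hm72, pyRemove_of_mem hm72]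
                  rw [alt_done (by have h9 := sum_erase_int hm72; rw [h9, hsum]; omega)]
                · have hn7 : (7 : Int) ∉ x := hm7
                  have hn72 : (7 : Int) ∉ x.erase 4 := fun h => hn7 ((mem_erase_of_ne' (by norm_num)).mp h)
                  exfalso
                  have k1 := count_zero_of_not_mem hn1
                  have k4 := count_le_one_of_not_mem_erase hn42
                  have k7 := count_zero_of_not_mem hn7
                  rcases hP with hp0 | ⟨hp1, hd1⟩ | ⟨hp2, hd2⟩
                  · rw [mod3_pysem] at hp0; omega
                  · rw [mod3_pysem] at hp1; omega
                  · rcases hd2 with m | m | m | m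
                    · exact hn2 m
                    · exact hn5 m
                    · exact hn8 m
                    · omega
            · have hn4 : (4 : Int) ∉ x := hm4
              by_cases hm7 : (7 : Int) ∈ x
              · have hsum : (x.erase 7).sum = x.sum - 7 := sum_erase_int hm7
                have hr' : (x.erase 7).sum % 3 = 1 := by rw [hsum]; omega
                rw [solution03, solution03_alt]
                simp [mod3_pysem, hr, List.find?, hn2, hn5, hn8, hn1, hn4, hm7, pyRemove_of_mem hm7]
                have hn2' : (2 : Int) ∉ x.erase 7 := fun h => hn2 ((mem_erase_of_ne' (by norm_num)).mp h)
                have hn5' : (5 : Int) ∉ x.erase 7 := fun h => hn5 ((mem_erase_of_ne' (by norm_num)).mp h)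
                have hn8' : (8 : Int) ∉ x.erase 7 := fun h => hn8 ((mem_erase_of_ne' (by norm_num)).mp h)
                have hn12 : (1 : Int) ∉ x.erase 7 := fun h => hn1 ((mem_erase_of_ne' (by norm_num)).mp h)
                have hn42 : (4 : Int) ∉ x.erase 7 := fun h => hn4 ((mem_erase_of_ne' (by norm_num)).mp h)
                by_cases hm72 : (7 : Int) ∈ x.erase 7
                · rw [solution03, solution03_alt]
                  simp [mod3_pysem, hr', List.find?, hn2', hn5', hn8', hn12, hn42, hm72, pyRemove_of_mem hm72]
                  rw [alt_done (by have h9 := sum_erase_int hm72; rw [h9, hsum]; omega)]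
                · have hn72 : (7 : Int) ∉ x.erase 7 := hm72
                  exfalso
                  have k1 := count_zero_of_not_mem hn1
                  have k4 := count_zero_of_not_mem hn4
                  have k7 := count_le_one_of_not_mem_erase hn72
                  rcases hP with hp0 | ⟨hp1, hd1⟩ | ⟨hp2, hd2⟩
                  · rw [mod3_pysem] at hp0; omega
                  · rw [mod3_pysem] at hp1; omega
                  · rcases hd2 with m | m | m | m
                    · exact hn2 m
                    · exact hn5 m
                    · exact hn8 m
                    · omega
              · have hn7 : (7 : Int) ∉ x := hm7
                exfalso
                have k1 := count_zero_of_not_mem hn1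
                have k4 := count_zero_of_not_mem hn4
                have k7 := count_zero_of_not_mem hn7
                rcases hP with hp0 | ⟨hp1, hd1⟩ | ⟨hp2, hd2⟩
                · rw [mod3_pysem] at hp0; omega
                · rw [mod3_pysem] at hp1; omega
                · rcases hd2 with m | m | m | m
                  · exact hn2 m
                  · exact hn5 m
                  · exact hn8 m
                  · omega

-- ===== VERDICT (by name: the statement is the Claim_ definition above) =====
theorem solution03_spec : Claim_equal_solution03 := by
  intro x _ hP
  unfold Spec_solution03
  exact main_equiv x hP
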